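-- pv_equiv track=rewrite | github.com/jbooth04BBK/RE200-GRACE | Phase 1/common_routines.py | get_stages
-- ===== SOURCE A (Python) =====
-- def isInt(s):
--     try:
--         int(s)
--         return True
--     except ValueError:
--         return False
--
-- def get_stages(args, default=None):
--     # look for a list of stages from arguments passed to main script
--     if default is None:
--         default = [1, ]
--
--     if len(args) >= 2:
--         found_stages = False
--         stages = []
--
--         for arg_num, arg in enumerate(args):
--
--             if found_stages:
--                 if isInt(arg):
--                     stages.append(int(arg))
--                 else:
--                     break
--             else:
--                 if arg.lower() == "-stages":
--                     found_stages = True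
--
--         if len(stages) == 0:
--             stages = default
--         else:
--             # sort into numeric order
--             stages.sort()
--     else:
--         stages = default
--
--     return stages
-- ===== SOURCE B (Python) =====
-- def isInt(s):
--     try:
--         int(s)
--         return True
--     except ValueError:
--         return False
--
-- def get_stages(args, default=None):
--     # single right-to-left pass: maintain the maximal int-run starting at the
--     # current suffix; assigning on each flag makes the leftmost flag win last.
--     if default is None:
--         default = [1]
--     if len(args) < 2:
--         return default
--     run = []        # maximal run of int-parsable args starting at current position
--     stages = None   # run following the leftmost '-stages' seen so far
--     for arg in reversed(args):
--         if arg.lower() == "-stages":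
--             stages = run
--         run = [int(arg)] + run if isInt(arg) else []
--     return sorted(stages) if stages else default
-- ===== Notes on version B (the rewrite author's own statement) =====
-- stated objective: alternative
-- what changed: Replaces A's left-to-right boolean state-machine (find flag, then append ints until break) with a single right-to-left pass that maintains the maximal int-run starting at each suffix and snapshots it at every flag, so the leftmost flag's snapshot survives by overwrite; no break and no flag variable.
import Mathlib
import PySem

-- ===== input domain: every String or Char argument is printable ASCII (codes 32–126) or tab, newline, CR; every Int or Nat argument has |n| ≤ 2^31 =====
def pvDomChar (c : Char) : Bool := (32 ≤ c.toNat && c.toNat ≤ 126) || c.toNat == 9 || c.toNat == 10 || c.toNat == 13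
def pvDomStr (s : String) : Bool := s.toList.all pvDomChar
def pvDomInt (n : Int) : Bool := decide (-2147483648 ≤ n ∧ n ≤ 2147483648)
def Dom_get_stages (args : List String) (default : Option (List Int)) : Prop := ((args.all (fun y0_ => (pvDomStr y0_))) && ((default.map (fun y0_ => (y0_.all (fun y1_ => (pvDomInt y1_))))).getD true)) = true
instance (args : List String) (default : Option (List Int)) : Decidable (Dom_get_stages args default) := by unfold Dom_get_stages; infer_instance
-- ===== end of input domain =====

-- B replaces A's forward flag state-machine by a single right-to-left pass with overwrite (objective: alternative).
-- ===== PORT A =====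
def isIntA (s : String) : Bool := (PySem.Int.ofStr? s).isSome

-- A's for-loop with found_stages flag and break
def gsLoopA : List String → Bool → List Int → Bool × List Int
  | [], found, stages => (found, stages)
  | a :: rest, found, stages =>
    if found then
      if isIntA a then gsLoopA rest found (stages ++ [(PySem.Int.ofStr? a).getD 0])
      else (found, stages)  -- break
    else
      if PySem.Str.lower a == "-stages" then gsLoopA rest true stages
      else gsLoopA rest found stages

def get_stages (args : List String) (default : Option (List Int)) : List Int :=
  let default := default.getD [1]
  if args.length ≥ 2 then
    let stages := (gsLoopA args false []).2
    if stages.length = 0 then default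
    else PySem.List.sorted stages (fun x => x) false
  else default

-- ===== PORT B =====
-- one step of B's reversed-iteration loop: state = (run, stages)
def gsStepB (arg : String) (st : List Int × Option (List Int)) : List Int × Option (List Int) :=
  let stages := if PySem.Str.lower arg == "-stages" then some st.1 else st.2
  (match PySem.Int.ofStr? arg with
   | some n => n :: st.1
   | none => [], stages)

def get_stages_alt (args : List String) (default : Option (List Int)) : List Int :=
  let d := default.getD [1]
  if args.length < 2 then d
  else
    -- 'for arg in reversed(args)' with state (run, stages) = foldr over args
    match (args.foldr gsStepB ([], none)).2 with
    | none => d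
    | some [] => d
    | some s => PySem.List.sorted s (fun x => x) false

-- ===== PRECONDITION & SPEC =====
def Spec_get_stages (args : List String) (default : Option (List Int)) (out : List Int) : Prop := out = get_stages_alt args default
instance (args : List String) (default : Option (List Int)) (out : List Int) : Decidable (Spec_get_stages args default out) := by unfold Spec_get_stages; infer_instance

-- ===== CLAIM (what is proved, stated in full; the proofs are below) =====
def Claim_equal_get_stages : Prop := ∀ (args : List String) (default : Option (List Int)), Dom_get_stages args default → Spec_get_stages args default (get_stages args default)

-- ===== LEMMAS AND PROOFS =====

-- proof-side characterisations of both loops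
def takeInts : List String → List Int
  | [] => []
  | a :: rest =>
    match PySem.Int.ofStr? a with
    | some n => n :: takeInts rest
    | none => []

def optStages : List String → Option (List Int)
  | [] => none
  | a :: rest => if PySem.Str.lower a == "-stages" then some (takeInts rest) else optStages rest

-- B's foldr computes (leading int-run, run after leftmost flag)
theorem foldrB_eq (l : List String) : l.foldr gsStepB ([], none) = (takeInts l, optStages l) := by
  induction l with
  | nil => simp [takeInts, optStages]
  | cons a rest ih =>
    cases h : PySem.Int.ofStr? a <;>
      simp [gsStepB, ih, takeInts, optStages, h]

-- once the flag is found, A's loop appends exactly the leading run of ints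
theorem gsLoopA_found (l : List String) : ∀ s : List Int, gsLoopA l true s = (true, s ++ takeInts l) := by
  induction l with
  | nil => intro s; simp [gsLoopA, takeInts]
  | cons a rest ih =>
    intro s
    by_cases h : isIntA a = true
    · obtain ⟨n, hn⟩ : ∃ n, PySem.Int.ofStr? a = some n := by
        simpa [isIntA, Option.isSome_iff_exists] using h
      simp [gsLoopA, takeInts, h, hn, ih]
    · have hn : PySem.Int.ofStr? a = none := by
        simpa [isIntA, Option.isSome_iff_exists, Option.eq_none_iff_forall_ne_some] using h
      simp [gsLoopA, takeInts, h, hn]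

-- before the flag is found, A's loop is governed by optStages
theorem gsLoopA_notfound (l : List String) :
    ∀ s : List Int,
      gsLoopA l false s =
        (match optStages l with
         | none => (false, s)
         | some t => (true, s ++ t)) := by
  induction l with
  | nil => intro s; simp [gsLoopA, optStages]
  | cons a rest ih =>
    intro s
    by_cases h : (PySem.Str.lower a == "-stages") = true
    · simp [gsLoopA, optStages, h, gsLoopA_found]
    · cases hf : optStages rest <;>
        simp [gsLoopA, optStages, h, hf, ih]

-- ===== VERDICT (by name: the statement is the Claim_ definition above) =====
theorem get_stages_spec : Claim_equal_get_stages := by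
  intro args default _
  unfold Spec_get_stages get_stages get_stages_alt
  by_cases h2 : args.length < 2
  · have : ¬ args.length ≥ 2 := by omega
    simp [this, h2]
  · have hge : args.length ≥ 2 := by omega
    simp only [hge, if_pos, h2]
    rw [gsLoopA_notfound, foldrB_eq]
    cases hf : optStages args with
    | none => simp
    | some t =>
      simp only [List.nil_append]
      rcases t with _ | ⟨x, xs⟩ <;> simp
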